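-- pv_equiv track=rewrite | github.com/ivekhov/AlgoOtus | pytester/pytester/algo4test/chess_collections.py | find_steps_king
-- ===== SOURCE A (Python) =====
-- def find_steps_king(x):
--     k = 1 << x
--     nA = 0xFeFeFeFeFeFeFeFe
--     nH = 0x7f7f7f7f7f7f7f7f
--     n8 = 0x00FFFFFFFFFFFFFF  # due to python int object, not liminted by 64 bit
--
--     p7 = (k & nA & n8) << 7  # added
--     p8 = (k & n8) << 8  # added
--     p9 = (k & nH & n8) << 9  # added
--     p4 = (k & nA) >> 1
--     p6 = (k & nH) << 1
--     p1 = (k & nA) >> 9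
--     p2 = k >> 8
--     p3 = (k & nH) >> 7
--     bit_mask = p7 | p8 | p9 | p4 | p6 | p1 | p2 | p3
--
--     temp = bit_mask
--     cnt = 0
--     while temp != 0:
--         temp &= (temp - 1)
--         cnt += 1
--
--     return cnt, bit_mask
-- ===== SOURCE B (Python) =====
-- MASK64 = (1 << 64) - 1
-- NOT_A_FILE = 0xfefefefefefefefe
-- NOT_H_FILE = 0x7f7f7f7f7f7f7f7f
--
--
-- def find_steps_king(x):
--     k = 1 << x
--     horiz = ((k & NOT_H_FILE) << 1) | ((k & NOT_A_FILE) >> 1)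
--     trio = horiz | k
--     bit_mask = horiz | ((trio << 8) & MASK64) | (trio >> 8)
--     cnt = bin(bit_mask).count("1")
--     return cnt, bit_mask
-- ===== Notes on version B (the rewrite author's own statement) =====
-- stated objective: alternative
-- what changed: Replaced A's eight independent masked shift expressions with the classic two-step king-attack computation (fold the horizontal neighbours first, then shift the king+horizontal trio one rank up and down, clamping the up-shift to 64 bits) and replaced A's Kernighan clear-lowest-bit counting loop with bin(bit_mask).count('1'); Pre_ excludes only negative x, where '1 << x' raises ValueError.
import Mathlib
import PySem

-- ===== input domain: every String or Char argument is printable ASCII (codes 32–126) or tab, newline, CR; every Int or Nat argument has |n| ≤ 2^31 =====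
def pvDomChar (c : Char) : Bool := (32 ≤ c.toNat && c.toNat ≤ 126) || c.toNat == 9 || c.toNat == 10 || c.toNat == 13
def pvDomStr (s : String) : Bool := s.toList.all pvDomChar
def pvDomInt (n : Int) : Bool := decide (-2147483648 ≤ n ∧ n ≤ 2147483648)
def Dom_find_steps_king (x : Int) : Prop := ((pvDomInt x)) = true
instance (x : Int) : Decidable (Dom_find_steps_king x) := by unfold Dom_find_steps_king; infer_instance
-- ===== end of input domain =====

-- B replaces A's eight independent masked shifts + Kernighan popcount loop with the classic
-- two-step king-attack computation (fold horizontal, shift the trio up/down) and a binary-digit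
-- count (objective: alternative).

-- ===== PORT A =====
-- Python's 'while temp != 0: temp &= temp - 1; cnt += 1'
-- (fuel-guarded structural recursion; 'temp' itself bounds the iteration count,
-- since 'temp &&& (temp - 1) < temp' whenever temp ≠ 0, so the fuel never runs out)
def pvPopLoopF (fuel : Nat) (temp : Nat) (cnt : Nat) : Nat :=
  match fuel with
  | 0 => cnt
  | fuel + 1 => if temp = 0 then cnt else pvPopLoopF fuel (temp &&& (temp - 1)) (cnt + 1)

def pvPopLoop (temp : Nat) (cnt : Nat) : Nat := pvPopLoopF temp temp cnt

-- 'k = 1 << x' raises ValueError for x < 0 (excluded by Pre_); for 0 ≤ x every value below is a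
-- natural number, so the port works over Nat (exact for Python's arbitrary-precision ints).
def find_steps_king (x : Int) : Int × Int :=
  let k : Nat := if 0 ≤ x then 1 <<< x.toNat else 0
  let nA : Nat := 0xFeFeFeFeFeFeFeFe
  let nH : Nat := 0x7f7f7f7f7f7f7f7f
  let n8 : Nat := 0x00FFFFFFFFFFFFFF
  let p7 := (k &&& nA &&& n8) <<< 7
  let p8 := (k &&& n8) <<< 8
  let p9 := (k &&& nH &&& n8) <<< 9
  let p4 := (k &&& nA) >>> 1
  let p6 := (k &&& nH) <<< 1
  let p1 := (k &&& nA) >>> 9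
  let p2 := k >>> 8
  let p3 := (k &&& nH) >>> 7
  let bit_mask := p7 ||| p8 ||| p9 ||| p4 ||| p6 ||| p1 ||| p2 ||| p3
  ((pvPopLoop bit_mask 0 : Int), (bit_mask : Int))

-- ===== PORT B =====
-- "bin(n).count('1')": the number of 1 digits in n's binary expansion, by the expansion itself
-- (fuel-guarded structural recursion; fuel n suffices since n has at most n binary digits)
def pvBinCount (fuel : Nat) (n : Nat) : Nat :=
  match fuel with
  | 0 => 0
  | fuel + 1 => if n = 0 then 0 else n % 2 + pvBinCount fuel (n / 2)

-- transliteration of Source B; as in port A, '1 << x' confines Pre_ to 0 ≤ x and all values are Nat.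
def find_steps_king_alt (x : Int) : Int × Int :=
  let mask64 : Nat := 0xFFFFFFFFFFFFFFFF
  let notA : Nat := 0xfefefefefefefefe
  let notH : Nat := 0x7f7f7f7f7f7f7f7f
  let k : Nat := if 0 ≤ x then 1 <<< x.toNat else 0
  let horiz := ((k &&& notH) <<< 1) ||| ((k &&& notA) >>> 1)
  let trio := horiz ||| k
  let bit_mask := horiz ||| ((trio <<< 8) &&& mask64) ||| (trio >>> 8)
  ((pvBinCount bit_mask bit_mask : Int), (bit_mask : Int))

-- ===== PRECONDITION & SPEC =====
-- A raises ValueError (from '1 << x') for negative x; Pre_ excludes only those inputs.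
def Pre_find_steps_king (x : Int) : Prop := 0 ≤ x
instance (x : Int) : Decidable (Pre_find_steps_king x) := by unfold Pre_find_steps_king; infer_instance
def pvWitness_find_steps_king : Int := (27)
def Spec_find_steps_king (x : Int) (out : Int × Int) : Prop := out = find_steps_king_alt x
instance (x : Int) (out : Int × Int) : Decidable (Spec_find_steps_king x out) := by unfold Spec_find_steps_king; infer_instance

-- ===== CLAIM (what is proved, stated in full; the proofs are below) =====
def Claim_equal_find_steps_king : Prop := ∀ (x : Int), Dom_find_steps_king x → Pre_find_steps_king x → Spec_find_steps_king x (find_steps_king x)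

-- ===== LEMMAS AND PROOFS =====

-- the 64 board squares, by computation
theorem pv_agree_board : ∀ n : Nat, n < 64 → find_steps_king (n : Int) = find_steps_king_alt (n : Int) := by
  decide

-- a power of two meets no constant below it
theorem pv_pow_and_small (n : Nat) (c : Nat) (h : c < 2 ^ n) : 2 ^ n &&& c = 0 := by
  apply Nat.eq_of_testBit_eq
  intro i
  simp only [Nat.testBit_and, Nat.testBit_two_pow, Nat.zero_testBit, Bool.and_eq_false_iff]
  by_cases hi : n = i
  · exact Or.inr (by simpa [hi] using Nat.testBit_lt_two_pow (hi ▸ h))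
  · exact Or.inl (by simp [hi])

theorem pv_pow_and_pred (n : Nat) : 2 ^ n &&& (2 ^ n - 1) = 0 :=
  pv_pow_and_small n _ (Nat.sub_lt (Nat.two_pow_pos n) Nat.one_pos)

theorem pv_popLoopF_zero (fuel cnt : Nat) : pvPopLoopF fuel 0 cnt = cnt := by
  cases fuel <;> simp [pvPopLoopF]

theorem pv_popLoop_pow (m : Nat) : pvPopLoop (2 ^ m) 0 = 1 := by
  unfold pvPopLoop
  obtain ⟨f, hf⟩ : ∃ f, 2 ^ m = f + 1 :=
    ⟨2 ^ m - 1, (Nat.succ_pred_eq_of_pos (Nat.two_pow_pos m)).symm⟩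
  calc pvPopLoopF (2 ^ m) (2 ^ m) 0
      = pvPopLoopF f (2 ^ m &&& (2 ^ m - 1)) 1 := by
        rw [hf]
        simp [pvPopLoopF]
    _ = 1 := by rw [pv_pow_and_pred]; exact pv_popLoopF_zero f 1

theorem pv_binCount_zero (fuel : Nat) : pvBinCount fuel 0 = 0 := by
  cases fuel <;> simp [pvBinCount]

-- the fuel is irrelevant once it covers the argument
theorem pv_binCount_fuel : ∀ (f₁ f₂ n : Nat), n ≤ f₁ → n ≤ f₂ → pvBinCount f₁ n = pvBinCount f₂ n := by
  intro f₁
  induction f₁ with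
  | zero =>
    intro f₂ n h1 _
    have : n = 0 := Nat.le_zero.mp h1
    subst this
    rw [pv_binCount_zero, pv_binCount_zero]
  | succ g ih =>
    intro f₂ n h1 h2
    by_cases hn : n = 0
    · subst hn; rw [pv_binCount_zero, pv_binCount_zero]
    · obtain ⟨h, rfl⟩ : ∃ h, f₂ = h + 1 :=
        ⟨f₂ - 1, (Nat.succ_pred_eq_of_pos (by omega)).symm⟩
      simp only [pvBinCount, if_neg hn]
      have hhalf : n / 2 ≤ g := by omega
      have hhalf' : n / 2 ≤ h := by omega
      congr 1
      exact ih h (n / 2) hhalf hhalf'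

theorem pv_binCount_pow (j : Nat) : pvBinCount (2 ^ j) (2 ^ j) = 1 := by
  induction j with
  | zero => decide
  | succ i ih =>
    obtain ⟨f, hf⟩ : ∃ f, 2 ^ (i + 1) = f + 1 :=
      ⟨2 ^ (i + 1) - 1, (Nat.succ_pred_eq_of_pos (Nat.two_pow_pos _)).symm⟩
    have hne : (2 : Nat) ^ (i + 1) ≠ 0 := (Nat.two_pow_pos _).ne'
    calc pvBinCount (2 ^ (i + 1)) (2 ^ (i + 1))
        = 2 ^ (i + 1) % 2 + pvBinCount f (2 ^ (i + 1) / 2) := by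
          rw [hf]; simp only [pvBinCount, if_neg (hf ▸ hne)]
      _ = pvBinCount f (2 ^ i) := by
          have e1 : 2 ^ (i + 1) % 2 = 0 := by rw [pow_succ]; exact Nat.mul_mod_left _ _
          have e2 : 2 ^ (i + 1) / 2 = 2 ^ i := by
            rw [pow_succ]; exact Nat.mul_div_cancel _ (by norm_num)
          rw [e1, e2, Nat.zero_add]
      _ = 1 := by
          rw [pv_binCount_fuel f (2 ^ i) (2 ^ i) (by omega) le_rfl, ih]

-- off-board squares x ≥ 64: in A only the unmasked downward shift k >> 8 survives; in B the
-- horizontal fold is zero and the up-shift is clamped away, leaving trio >> 8 = k >> 8 too;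
-- both masks are the single bit 2 ^ (x - 8) and both counts are 1.
theorem pv_agree_big (x : Int) (h : 64 ≤ x) : find_steps_king x = find_steps_king_alt x := by
  have h0 : 0 ≤ x := by omega
  have hn : 64 ≤ x.toNat := by omega
  have hpow : ∀ c : Nat, c < 2 ^ 64 → 2 ^ x.toNat &&& c = 0 := fun c hc =>
    pv_pow_and_small x.toNat c (lt_of_lt_of_le hc (Nat.pow_le_pow_right (by norm_num) hn))
  have hA : find_steps_king x = (1, ((2 ^ (x.toNat - 8) : Nat) : Int)) := by
    show (_, _) = _
    simp only [if_pos h0, Nat.one_shiftLeft]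
    rw [hpow 0xFeFeFeFeFeFeFeFe (by norm_num), hpow 0x7f7f7f7f7f7f7f7f (by norm_num),
        hpow 0x00FFFFFFFFFFFFFF (by norm_num)]
    simp only [Nat.zero_and, Nat.zero_shiftLeft, Nat.zero_shiftRight, Nat.zero_or, Nat.or_zero]
    rw [Nat.shiftRight_eq_div_pow, Nat.pow_div (by omega) (by norm_num), pv_popLoop_pow]
    norm_num
  have hB : find_steps_king_alt x = (1, ((2 ^ (x.toNat - 8) : Nat) : Int)) := by
    show (_, _) = _
    simp only [if_pos h0, Nat.one_shiftLeft]
    rw [hpow 0x7f7f7f7f7f7f7f7f (by norm_num), hpow 0xfefefefefefefefe (by norm_num)]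
    simp only [Nat.zero_shiftLeft, Nat.zero_shiftRight, Nat.zero_or, Nat.or_zero]
    rw [Nat.shiftLeft_eq, show (2:Nat) ^ x.toNat * 2 ^ 8 = 2 ^ (x.toNat + 8) from (pow_add 2 _ _).symm]
    rw [pv_pow_and_small (x.toNat + 8) 0xFFFFFFFFFFFFFFFF
          (show (0xFFFFFFFFFFFFFFFF : Nat) < 2 ^ (x.toNat + 8) from
            lt_of_lt_of_le (by norm_num : (0xFFFFFFFFFFFFFFFF : Nat) < 2 ^ 64)
              (Nat.pow_le_pow_right (by norm_num) (by omega)))]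
    simp only [Nat.zero_or]
    rw [Nat.shiftRight_eq_div_pow, Nat.pow_div (by omega) (by norm_num), pv_binCount_pow]
    norm_num
  rw [hA, hB]

-- ===== VERDICT (by name: the statement is the Claim_ definition above) =====
theorem find_steps_king_spec : Claim_equal_find_steps_king := by
  intro x _ hpre
  unfold Spec_find_steps_king
  by_cases h : x < 64
  · have hx : x = (x.toNat : Int) := (Int.toNat_of_nonneg hpre).symm
    have hlt : x.toNat < 64 := by omega
    rw [hx]
    exact pv_agree_board x.toNat hlt
  · exact pv_agree_big x (by omega)
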